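-- pv_equiv track=rewrite | github.com/marsandnoa/CSE-Python | Hw2/Hw2.py | ispartitionable
-- ===== SOURCE A (Python) =====
-- def ispartitionable(s):
--   output=False
--   i=0
--   while i<len(s):
--     if(sum(s[0:i])==sum(s[i:len(s)])):
--       output=True
--     i=i+1
--   return output
-- ===== SOURCE B (Python) =====
-- def ispartitionable(s):
--     total = sum(s)
--     prefix = 0
--     found = False
--     for x in s:
--         if prefix == total - prefix:
--             found = True
--         prefix += x
--     return found
-- ===== Notes on version B (the rewrite author's own statement) =====
-- stated objective: faster
-- what changed: Replaced the quadratic loop that re-sums both slices at every split point with a single pass maintaining a running prefix sum compared against the precomputed total.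
import Mathlib
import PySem

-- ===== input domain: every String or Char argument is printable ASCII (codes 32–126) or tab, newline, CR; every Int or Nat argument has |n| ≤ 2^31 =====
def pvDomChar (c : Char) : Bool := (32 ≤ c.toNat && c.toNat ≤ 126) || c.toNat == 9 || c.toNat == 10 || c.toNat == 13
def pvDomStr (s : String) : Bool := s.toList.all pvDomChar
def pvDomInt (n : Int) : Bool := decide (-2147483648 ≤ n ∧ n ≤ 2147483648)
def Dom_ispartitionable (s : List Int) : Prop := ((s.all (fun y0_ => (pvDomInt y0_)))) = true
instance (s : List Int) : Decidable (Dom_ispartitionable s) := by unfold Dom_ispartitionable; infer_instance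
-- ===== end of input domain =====

-- B replaces A's quadratic re-summing of both slices at every split point by one pass
-- with a running prefix sum compared against the precomputed total (return value only).

-- ===== PORT A =====
-- while i < len(s): if sum(s[0:i]) == sum(s[i:len(s)]): output = True; i += 1
def ispartitionable (s : List Int) : Bool :=
  (PySem.List.pyRange 0 (s.length : Int) 1).foldl
    (fun output i =>
      if (PySem.List.slice s (some 0) (some i)).sum
           = (PySem.List.slice s (some i) (some (s.length : Int))).sum
      then true else output) false

-- ===== PORT B =====
-- total = sum(s); prefix = 0; found = False; for x in s: check then prefix += x
def ispartitionable_alt (s : List Int) : Bool :=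
  let total := s.sum
  (s.foldl (fun (st : Int × Bool) x =>
      (st.1 + x, if st.1 = total - st.1 then true else st.2)) ((0 : Int), false)).2

-- ===== PRECONDITION & SPEC =====
def Spec_ispartitionable (s : List Int) (out : Bool) : Prop := out = ispartitionable_alt s
instance (s : List Int) (out : Bool) : Decidable (Spec_ispartitionable s out) := by unfold Spec_ispartitionable; infer_instance

-- ===== CLAIM (what is proved, stated in full; the proofs are below) =====
def Claim_equal_ispartitionable : Prop := ∀ (s : List Int), Dom_ispartitionable s → Spec_ispartitionable s (ispartitionable s)

-- ===== LEMMAS AND PROOFS =====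

-- reference scan: at each position, does the prefix sum p satisfy p = total - p?
def pvScan (total : Int) : Int → List Int → Bool
  | _, [] => false
  | p, x :: xs => decide (p = total - p) || pvScan total (p + x) xs

-- A's accumulator loop is an `any` over the range
theorem pv_foldl_if_any (L : List Int) (P : Int → Prop) [DecidablePred P] (b : Bool) :
    L.foldl (fun o i => if P i then true else o) b = (b || L.any (fun i => decide (P i))) := by
  induction L generalizing b with
  | nil => simp
  | cons x xs ih =>
      simp only [List.foldl_cons, List.any_cons, ih]
      by_cases h : P x <;> simp [h]

-- B's pair fold computes pvScan
theorem pv_foldl_scan (total : Int) (s : List Int) (p : Int) (b : Bool) :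
    (s.foldl (fun (st : Int × Bool) x =>
      (st.1 + x, if st.1 = total - st.1 then true else st.2)) (p, b)).2
    = (b || pvScan total p s) := by
  induction s generalizing p b with
  | nil => simp [pvScan]
  | cons x xs ih =>
      rw [List.foldl_cons, ih, pvScan]
      by_cases h : p = total - p
      · rw [if_pos h, decide_eq_true h]
        simp
      · rw [if_neg h, decide_eq_false h]
        simp

-- the range-any over prefix sums equals pvScan
theorem pv_any_scan (total : Int) (s : List Int) (p : Int) :
    (List.range s.length).any
      (fun k => decide (p + (s.take k).sum = total - (p + (s.take k).sum)))
    = pvScan total p s := by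
  induction s generalizing p with
  | nil => simp [pvScan]
  | cons x xs ih =>
      rw [show (x :: xs).length = xs.length + 1 from rfl, List.range_succ_eq_map]
      simp only [List.any_cons, List.any_map, Function.comp_def, List.take_succ_cons,
        List.sum_cons, List.take_zero, List.sum_nil, add_zero, pvScan]
      rw [← ih (p + x)]
      congr 1
      congr 1
      funext k
      apply decide_eq_decide.mpr
      constructor <;> intro h <;> omega

-- ===== VERDICT (by name: the statement is the Claim_ definition above) =====
theorem ispartitionable_spec : Claim_equal_ispartitionable := by
  intro s _
  unfold Spec_ispartitionable ispartitionable ispartitionable_alt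
  rw [pv_foldl_if_any, pv_foldl_scan, Bool.false_or, Bool.false_or,
    PySem.List.pyRange_one]
  rw [← pv_any_scan s.sum s 0]
  simp only [Int.toNat_natCast, List.any_map, Function.comp_def, zero_add,
    sub_zero]
  congr 1
  funext k
  by_cases hk : k ≤ s.length
  · rw [PySem.List.slice_zero_start, PySem.List.slice_to_natCast,
      PySem.List.slice_natCast]
    have hdrop : (s.drop k).take (s.length - k) = s.drop k := by
      apply List.take_of_length_le; simp
    rw [hdrop]
    apply decide_eq_decide.mpr
    have := List.sum_take_add_sum_drop s k
    constructor <;> intro h <;> omega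
  · rw [PySem.List.slice_zero_start, PySem.List.slice_to_natCast,
      PySem.List.slice_natCast]
    have h1 : s.take k = s := List.take_of_length_le (by omega)
    have h2 : s.drop k = [] := List.drop_eq_nil_of_le (by omega)
    simp [h1, h2]
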